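-- pv_equiv track=rewrite | github.com/pytorch/test-infra | aws/lambda/benchmark_regression_summary_report/common/regression_utils.py | classify_flags
-- ===== SOURCE A (Python) =====
-- from typing import Any, Counter, Dict, List, Literal, Optional, TypedDict
--
-- RegressionClassifyLabel = Literal[
--     "regression", "suspicious", "no_regression", "insufficient_data"
-- ]
--
-- def classify_flags(
--     flags: list[bool], min_points: int = 3
-- ) -> RegressionClassifyLabel:
--     """
--     Classify a sequence of boolean flags to detect regression.
--
--     - regression: last run has >= 2 consecutive True values
--     - suspicious: there is a run of >= 3 consecutive True values, but not at the end
--     - no_regression: all other cases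
--     - insufficient_data: not enough data points (< min_points)
--
--     Special case:
--     - If min_points == 1, then just look at the last flag:
--         True  -> regression
--         False -> no_regression
--     """
--     n = len(flags)
--     if n == 0:
--         return "insufficient_data"
--
--     if min_points == 1:
--         return "regression" if flags[-1] else "no_regression"
--
--     if n < min_points:
--         return "insufficient_data"
--
--     # trailing run length
--     t = 0
--     for v in reversed(flags):
--         if v:
--             t += 1
--         else:
--             break
--     if t >= 2:
--         return "regression"
--
--     # longest run anywhere
--     longest = cur = 0
--     for v in flags:
--         cur = cur + 1 if v else 0
--         longest = max(longest, cur)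
--
--     if longest >= 3:
--         return "suspicious"
--
--     return "no_regression"
-- ===== SOURCE B (Python) =====
-- def classify_flags(flags, min_points=3):
--     n = len(flags)
--     if n == 0:
--         return "insufficient_data"
--
--     if min_points == 1:
--         return "regression" if flags[-1] else "no_regression"
--
--     if n < min_points:
--         return "insufficient_data"
--
--     # one run-length-encoding pass: table of (value, run_length) blocks in order
--     blocks = []
--     for v in flags:
--         if blocks and blocks[-1][0] == v:
--             blocks[-1][1] += 1
--         else:
--             blocks.append([v, 1])
--
--     last_v, last_k = blocks[-1]
--     if last_v and last_k >= 2: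
--         return "regression"
--     if any(v and k >= 3 for v, k in blocks):
--         return "suspicious"
--     return "no_regression"
-- ===== Notes on version B (the rewrite author's own statement) =====
-- stated objective: alternative
-- what changed: B replaces A's two scalar scans (trailing-run counter over reversed(flags) plus a longest-run fold) with a single run-length-encoding pass building a (value, run_length) block table, then classifies by inspecting the last block and the block table.
import Mathlib
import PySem

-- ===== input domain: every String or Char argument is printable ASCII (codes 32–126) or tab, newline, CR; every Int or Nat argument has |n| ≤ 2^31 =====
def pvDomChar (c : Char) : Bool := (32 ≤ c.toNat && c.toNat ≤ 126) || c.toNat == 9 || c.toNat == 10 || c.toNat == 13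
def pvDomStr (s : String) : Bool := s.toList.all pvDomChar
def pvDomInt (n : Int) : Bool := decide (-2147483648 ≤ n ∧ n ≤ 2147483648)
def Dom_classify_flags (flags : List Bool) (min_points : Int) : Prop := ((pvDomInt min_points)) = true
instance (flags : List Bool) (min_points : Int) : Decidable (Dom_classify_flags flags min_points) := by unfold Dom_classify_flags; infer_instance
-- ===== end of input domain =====

-- B builds one run-length-encoded block table instead of A's two scalar scans; alternative decomposition, same O(n) cost.

-- ===== PORT A =====
-- 'for v in reversed(flags): if v: t += 1 else: break' — counts the leading Trues of the reversed list
def trailLoop : List Bool → Nat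
  | [] => 0
  | v :: rest => if v then trailLoop rest + 1 else 0

-- one step of A's 'longest = cur = 0; for v in flags: cur = cur + 1 if v else 0; longest = max(longest, cur)'
def astep (p : Nat × Nat) (v : Bool) : Nat × Nat :=
  let cur := if v then p.2 + 1 else 0
  (max p.1 cur, cur)

def classify_flags (flags : List Bool) (min_points : Int) : String :=
  let n : Int := flags.length
  if n = 0 then "insufficient_data"
  else if min_points = 1 then
    -- flags[-1]; list is nonempty here, so pyGet? is some
    if (PySem.List.pyGet? flags (-1)).getD false then "regression" else "no_regression"
  else if n < min_points then "insufficient_data"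
  else
    let t := trailLoop flags.reverse
    if t ≥ 2 then "regression"
    else
      let p := flags.foldl astep (0, 0)
      if p.1 ≥ 3 then "suspicious" else "no_regression"

-- ===== PORT B =====
-- one step of B's RLE loop: 'if blocks and blocks[-1][0] == v: blocks[-1][1] += 1 else: blocks.append([v,1])';
-- the accumulator holds the blocks in REVERSE order (head = current last block); port reverses at the end.
def rleStep (acc : List (Bool × Nat)) (v : Bool) : List (Bool × Nat) :=
  match acc with
  | (b, k) :: rest => if b = v then (b, k + 1) :: rest else (v, 1) :: (b, k) :: rest
  | [] => [(v, 1)]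

def classify_flags_alt (flags : List Bool) (min_points : Int) : String :=
  let n : Int := flags.length
  if n = 0 then "insufficient_data"
  else if min_points = 1 then
    if (PySem.List.pyGet? flags (-1)).getD false then "regression" else "no_regression"
  else if n < min_points then "insufficient_data"
  else
    let blocks := (flags.foldl rleStep []).reverse
    let last := blocks.getLast?.getD (false, 0)   -- blocks[-1]; blocks nonempty since flags is
    if last.1 && decide (last.2 ≥ 2) then "regression"
    else if blocks.any (fun bk => bk.1 && decide (bk.2 ≥ 3)) then "suspicious"
    else "no_regression"

-- ===== PRECONDITION & SPEC =====
def Spec_classify_flags (flags : List Bool) (min_points : Int) (out : String) : Prop := out = classify_flags_alt flags min_points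
instance (flags : List Bool) (min_points : Int) (out : String) : Decidable (Spec_classify_flags flags min_points out) := by unfold Spec_classify_flags; infer_instance

-- ===== CLAIM (what is proved, stated in full; the proofs are below) =====
def Claim_equal_classify_flags : Prop := ∀ (flags : List Bool) (min_points : Int), Dom_classify_flags flags min_points → Spec_classify_flags flags min_points (classify_flags flags min_points)

-- ===== LEMMAS AND PROOFS =====

-- length of the current (head) block of the reversed-RLE accumulator, if it is a True block
def tbv (acc : List (Bool × Nat)) : Nat :=
  match acc with
  | (true, k) :: _ => k
  | _ => 0

-- longest True block recorded in the accumulator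
def bmaxAcc : List (Bool × Nat) → Nat
  | [] => 0
  | (b, k) :: r => if b then max k (bmaxAcc r) else bmaxAcc r

lemma foldl_inv (xs : List Bool) :
    (xs.foldl astep (0, 0)).1 = bmaxAcc (xs.foldl rleStep [])
    ∧ (xs.foldl astep (0, 0)).2 = tbv (xs.foldl rleStep []) := by
  induction xs using List.reverseRecOn with
  | nil => simp [tbv, bmaxAcc]
  | append_singleton ys a ih =>
    rcases ih with ⟨h1, h2⟩
    rw [List.foldl_append, List.foldl_append]
    rcases hacc : ys.foldl rleStep [] with _ | ⟨⟨b, k⟩, r⟩ <;>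
      rw [hacc] at h1 h2 <;>
      cases a <;> try cases b
    all_goals
      simp_all [astep, rleStep, tbv, bmaxAcc]
    all_goals omega

lemma trail_eq (xs : List Bool) : trailLoop xs.reverse = (xs.foldl astep (0, 0)).2 := by
  induction xs using List.reverseRecOn with
  | nil => simp [trailLoop]
  | append_singleton ys a ih =>
    rw [List.foldl_append, List.reverse_append]
    cases a <;> simp [trailLoop, astep, ih]

lemma any_bmax (acc : List (Bool × Nat)) :
    (acc.any (fun bk => bk.1 && decide (bk.2 ≥ 3))) = decide (bmaxAcc acc ≥ 3) := by
  induction acc with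
  | nil => simp [bmaxAcc]
  | cons hd tl ih =>
    rcases hd with ⟨b, k⟩
    cases b <;> simp [bmaxAcc, ih]

lemma last_reg (acc : List (Bool × Nat)) :
    ((acc.reverse.getLast?.getD (false, 0)).1 && decide ((acc.reverse.getLast?.getD (false, 0)).2 ≥ 2))
      = decide (tbv acc ≥ 2) := by
  rw [List.getLast?_reverse]
  rcases acc with _ | ⟨⟨b, k⟩, r⟩
  · simp [tbv]
  · cases b <;> simp [tbv]

-- ===== VERDICT (by name: the statement is the Claim_ definition above) =====
theorem classify_flags_spec : Claim_equal_classify_flags := by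
  intro flags min_points _
  unfold Spec_classify_flags classify_flags classify_flags_alt
  by_cases h0 : (flags.length : Int) = 0
  · simp [h0]
  · simp only [h0, if_false]
    by_cases h1 : min_points = 1
    · simp [h1]
    · simp only [h1, if_false]
      by_cases h2 : (flags.length : Int) < min_points
      · simp [h2]
      · simp only [h2, if_false]
        rw [trail_eq, (foldl_inv flags).2, (foldl_inv flags).1,
            List.any_reverse, any_bmax]
        rw [show (((flags.foldl rleStep []).reverse.getLast?.getD (false, 0)).1
              && decide (((flags.foldl rleStep []).reverse.getLast?.getD (false, 0)).2 ≥ 2))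
            = decide (tbv (flags.foldl rleStep []) ≥ 2) from last_reg _]
        by_cases hreg : tbv (flags.foldl rleStep []) ≥ 2 <;>
          by_cases hsus : bmaxAcc (flags.foldl rleStep []) ≥ 3 <;>
          simp [hreg, hsus]
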